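-- pv_equiv track=rewrite | github.com/sudhishsas/SushiBot | bot.py | generate_role_message
-- ===== SOURCE A (Python) =====
-- def generate_role_message(updated_roles: list,role_data: dict,max_roles: int) -> str:
--     #Generates a feedback message about the remaining roles and category breakdown.
--     # Count remaining roles
--     remaining_roles = max_roles - len([role for role in updated_roles if role and "None" not in role])
--     # Breakdown by category
--     role_breakdown = {category: 0 for category in role_data.keys()}
--     for role in updated_roles:
--         if role and "None" not in role:
--             for category, subroles in role_data.items():
--                 if role in subroles:
--                     role_breakdown[category] += 1
--     # Create detailed feedback message
--     breakdown_message = "\n".join(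
--         [f"**{category} roles:** {count}" for category, count in role_breakdown.items()]
--     )
--     role_list =str(updated_roles).replace("[", "").replace("]", "").replace("'", "")
--     feedback_message = f"\n\nYou have **{remaining_roles} roles remaining** to choose. \n Roles selected are: `{role_list}` \n\n{breakdown_message}"
--     return feedback_message
-- ===== SOURCE B (Python) =====
-- def generate_role_message(updated_roles: list, role_data: dict, max_roles: int) -> str:
--     # One pass over the selected roles builds a frequency table; each category's
--     # count is then the sum of frequencies of its (deduplicated) subroles.
--     valid = [r for r in updated_roles if r and "None" not in r]
--     remaining = max_roles - len(valid)
--     freq = {}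
--     for r in valid:
--         freq[r] = freq.get(r, 0) + 1
--     lines = [
--         f"**{category} roles:** {sum(freq.get(s, 0) for s in dict.fromkeys(subroles))}"
--         for category, subroles in role_data.items()
--     ]
--     breakdown_message = "\n".join(lines)
--     role_list = str(updated_roles).replace("[", "").replace("]", "").replace("'", "")
--     return f"\n\nYou have **{remaining} roles remaining** to choose. \n Roles selected are: `{role_list}` \n\n{breakdown_message}"
-- ===== Notes on version B (the rewrite author's own statement) =====
-- stated objective: faster
-- what changed: B replaces A's nested scan (for every selected role, test membership in every category's subrole list) by a single frequency table of the selected roles plus one dedup-and-sum pass over each category's subroles.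
import Mathlib
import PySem

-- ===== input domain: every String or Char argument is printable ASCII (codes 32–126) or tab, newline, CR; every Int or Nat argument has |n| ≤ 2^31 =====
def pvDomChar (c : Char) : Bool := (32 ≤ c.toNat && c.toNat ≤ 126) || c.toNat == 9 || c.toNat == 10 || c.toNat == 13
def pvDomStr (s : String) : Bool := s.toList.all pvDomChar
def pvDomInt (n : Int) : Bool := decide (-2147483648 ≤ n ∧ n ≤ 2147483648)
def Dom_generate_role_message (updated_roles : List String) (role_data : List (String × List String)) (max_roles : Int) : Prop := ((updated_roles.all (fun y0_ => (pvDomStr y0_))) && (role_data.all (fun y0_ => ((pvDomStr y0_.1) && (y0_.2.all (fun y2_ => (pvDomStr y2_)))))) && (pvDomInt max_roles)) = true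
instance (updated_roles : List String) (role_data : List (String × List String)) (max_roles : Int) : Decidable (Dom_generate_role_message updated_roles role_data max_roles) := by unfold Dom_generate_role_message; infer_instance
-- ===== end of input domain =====

-- B replaces A's per-role scan over every category's subrole list by a frequency table of the
-- selected roles plus one dedup-and-sum pass per category (objective: faster, asymptotic).

-- ===== shared string-formatting helpers (port of Python's str(list_of_str) and the f-strings) =====

-- repr of one str: exact on printable ASCII + tab/newline/CR (the stated domain)
def pvReprChars (cs : List Char) : List Char :=
  let q : Char := if '\'' ∈ cs ∧ ¬ ('"' ∈ cs) then '"' else '\''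
  q :: (cs.flatMap (fun c =>
    if c = '\\' then ['\\', '\\']
    else if c = q then ['\\', q]
    else if c = '\t' then ['\\', 't']
    else if c = '\n' then ['\\', 'n']
    else if c = '\r' then ['\\', 'r']
    else [c])) ++ [q]

-- str(updated_roles) followed by .replace("[","").replace("]","").replace("'","")
def pvRoleList (updated_roles : List String) : String :=
  let listStr : String := "[" ++ PySem.Str.join ", " (updated_roles.map (fun r => String.ofList (pvReprChars r.toList))) ++ "]"
  PySem.Str.replace (PySem.Str.replace (PySem.Str.replace listStr "[" "") "]" "") "'" ""

-- `role and "None" not in role`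
def pvValidRole (r : String) : Bool := (r != "") && !(PySem.Str.isIn "None" r)

-- final f-string
def pvAssemble (remaining : Int) (roleList breakdown : String) : String :=
  "\n\nYou have **" ++ PySem.Int.toStr remaining ++ " roles remaining** to choose. \n Roles selected are: `"
    ++ roleList ++ "` \n\n" ++ breakdown

-- ===== PORT A =====
def generate_role_message (updated_roles : List String) (role_data : List (String × List String)) (max_roles : Int) : String :=
  let rd : PySem.Dict String (List String) := PySem.Dict.ofList role_data
  let remaining_roles : Int := max_roles - ((updated_roles.filter pvValidRole).length : Int)
  -- role_breakdown = {category: 0 for category in role_data.keys()}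
  let d0 : PySem.Dict String Int := rd.keys.foldl (fun d c => d.insert c 0) PySem.Dict.empty
  -- nested loop: for role …: for category, subroles …: if role in subroles: role_breakdown[category] += 1
  -- (the key is always present, so Python's `d[cat] += 1` is d.modify cat 0 (·+1) here)
  let role_breakdown : PySem.Dict String Int :=
    updated_roles.foldl (fun d role =>
      if pvValidRole role then
        rd.items.foldl (fun d cs => if cs.2.contains role then d.modify cs.1 0 (· + 1) else d) d
      else d) d0
  let breakdown_message : String :=
    PySem.Str.join "\n" (role_breakdown.items.map (fun p => "**" ++ p.1 ++ " roles:** " ++ PySem.Int.toStr p.2))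
  pvAssemble remaining_roles (pvRoleList updated_roles) breakdown_message

-- ===== PORT B =====
def generate_role_message_alt (updated_roles : List String) (role_data : List (String × List String)) (max_roles : Int) : String :=
  let rd : PySem.Dict String (List String) := PySem.Dict.ofList role_data
  let valid : List String := updated_roles.filter pvValidRole
  let remaining : Int := max_roles - (valid.length : Int)
  -- freq[r] = freq.get(r, 0) + 1
  let freq : PySem.Dict String Int := valid.foldl (fun d r => d.insert r (d.getD r 0 + 1)) PySem.Dict.empty
  -- per category: sum(freq.get(s, 0) for s in dict.fromkeys(subroles))
  let lines : List String :=
    rd.items.map (fun cs =>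
      "**" ++ cs.1 ++ " roles:** " ++ PySem.Int.toStr (((PySem.List.dedup cs.2).map (fun s => freq.getD s 0)).sum))
  let breakdown_message : String := PySem.Str.join "\n" lines
  pvAssemble remaining (pvRoleList updated_roles) breakdown_message

-- ===== PRECONDITION & SPEC =====
def Spec_generate_role_message (updated_roles : List String) (role_data : List (String × List String)) (max_roles : Int) (out : String) : Prop := out = generate_role_message_alt updated_roles role_data max_roles
instance (updated_roles : List String) (role_data : List (String × List String)) (max_roles : Int) (out : String) : Decidable (Spec_generate_role_message updated_roles role_data max_roles out) := by unfold Spec_generate_role_message; infer_instance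

-- ===== CLAIM (what is proved, stated in full; the proofs are below) =====
def Claim_equal_generate_role_message : Prop := ∀ (updated_roles : List String) (role_data : List (String × List String)) (max_roles : Int), Dom_generate_role_message updated_roles role_data max_roles → Spec_generate_role_message updated_roles role_data max_roles (generate_role_message updated_roles role_data max_roles)

-- ===== LEMMAS AND PROOFS =====


-- sum of a 0/1 indicator over a Nodup list
theorem pv_sum_indicator (a : String) (S : List String) (h : S.Nodup) :
    (S.map (fun s => if s == a then (1:Int) else 0)).sum = if a ∈ S then 1 else 0 := by
  induction S with
  | nil => simp
  | cons x S ih =>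
    simp only [List.map_cons, List.sum_cons, List.nodup_cons] at *
    rcases h with ⟨hx, hnd⟩
    rw [ih hnd]
    by_cases hxa : x = a
    · subst hxa; simp [hx]
    · simp [hxa, Ne.symm hxa, beq_iff_eq]

-- B's dedup-and-sum of multiplicities equals the number of elements of `val` lying in `subs`
theorem pv_dedup_count (val subs : List String) :
    ((PySem.List.dedup subs).map (fun s => (val.count s : Int))).sum
      = (val.countP (fun r => subs.contains r) : Int) := by
  induction val with
  | nil => simp
  | cons a val ih =>
    have hcnt : ∀ s : String, ((a :: val).count s : Int)
        = (val.count s : Int) + (if s == a then (1:Int) else 0) := by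
      intro s
      rw [List.count_cons]
      by_cases h : s = a
      · simp [h]
      · simp [h, Ne.symm h, beq_iff_eq]
    calc ((PySem.List.dedup subs).map (fun s => ((a :: val).count s : Int))).sum
        = ((PySem.List.dedup subs).map (fun s => (val.count s : Int) + (if s == a then (1:Int) else 0))).sum :=
          congrArg List.sum (List.map_congr_left (fun s _ => hcnt s))
      _ = ((PySem.List.dedup subs).map (fun s => (val.count s : Int))).sum
            + ((PySem.List.dedup subs).map (fun s => if s == a then (1:Int) else 0)).sum :=
          PySem.List.sum_map_add_int _ _ _
      _ = (val.countP (fun r => subs.contains r) : Int) + (if a ∈ subs then 1 else 0) := by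
          rw [ih, pv_sum_indicator a _ (PySem.List.nodup_dedup subs)]
          simp
      _ = ((a :: val).countP (fun r => subs.contains r) : Int) := by
          rw [List.countP_cons]
          by_cases h : a ∈ subs <;> simp [h]

-- the {category: 0} initialisation leaves every slot at 0
theorem pv_init_getD (K : List String) (d : PySem.Dict String Int) (k : String) (h : d.getD k 0 = 0) :
    (K.foldl (fun d c => d.insert c 0) d).getD k 0 = 0 := by
  induction K generalizing d with
  | nil => simpa using h
  | cons c K ih =>
    simp only [List.foldl_cons]
    exact ih _ (by rw [PySem.Dict.getD_insert]; split_ifs <;> simp [h])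

-- one pass of A's inner category loop adds the countP of matching items to slot k
theorem pv_inner_getD (role k : String) (L : List (String × List String)) (d : PySem.Dict String Int) :
    (L.foldl (fun d cs => if cs.2.contains role then d.modify cs.1 0 (· + 1) else d) d).getD k 0
      = d.getD k 0 + (L.countP (fun p => p.1 == k && p.2.contains role) : Int) := by
  induction L generalizing d with
  | nil => simp
  | cons p L ih =>
    simp only [List.foldl_cons, List.countP_cons]
    by_cases hc : p.2.contains role = true
    · have hm : role ∈ p.2 := by simpa using hc
      rw [if_pos hc, ih, PySem.Dict.getD_modify]
      by_cases hk : k = p.1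
      · simp [hk, hm]; ring
      · simp [hk, hm, Ne.symm hk]
    · have hm : role ∉ p.2 := by simpa using hc
      rw [if_neg hc, ih]
      simp [hm]

-- over Nodup keys that countP is the 0/1 indicator of `role ∈ subs` at the unique item (k, subs)
theorem pv_countP_nodup (k role : String) (subs : List String) (L : List (String × List String))
    (hnd : (L.map Prod.fst).Nodup) (hmem : (k, subs) ∈ L) :
    L.countP (fun p => p.1 == k && p.2.contains role) = if subs.contains role then 1 else 0 := by
  induction L with
  | nil => simp at hmem
  | cons p L ih =>
    simp only [List.map_cons, List.nodup_cons] at hnd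
    rcases hnd with ⟨hp, hnd⟩
    rw [List.countP_cons]
    rcases List.mem_cons.mp hmem with heq | hmem'
    · have hz : L.countP (fun p => p.1 == k && p.2.contains role) = 0 := by
        apply List.countP_eq_zero.mpr
        intro q hq
        have hpk : p.1 = k := by rw [← heq]
        have : q.1 ≠ k := fun h => hp (hpk ▸ h ▸ List.mem_map_of_mem hq)
        simp [this]
      rw [hz, ← heq]
      simp
    · have hk : k ∈ L.map Prod.fst := (List.mem_map).mpr ⟨(k, subs), hmem', rfl⟩
      have hne : p.1 ≠ k := fun h => hp (h ▸ hk)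
      rw [ih hnd hmem']
      simp [hne]

-- A's inner loop never adds a key (every modified key is already present)
theorem pv_inner_keys (role : String) (L : List (String × List String)) (d : PySem.Dict String Int)
    (h : ∀ p ∈ L, p.1 ∈ d.keys) :
    (L.foldl (fun d cs => if cs.2.contains role then d.modify cs.1 0 (· + 1) else d) d).keys = d.keys := by
  induction L generalizing d with
  | nil => rfl
  | cons p L ih =>
    simp only [List.foldl_cons]
    by_cases hc : p.2.contains role = true
    · have hk : (d.modify p.1 0 (· + 1)).keys = d.keys := by
        rw [PySem.Dict.keys_modify,
          PySem.Dict.keys_insert_of_contains _ _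
            ((PySem.Dict.contains_iff_mem_keys d p.1).mpr (h p (List.mem_cons_self)))]
      rw [if_pos hc, ih _ (fun q hq => by rw [hk]; exact h q (List.mem_cons_of_mem _ hq))]
      exact hk
    · rw [if_neg hc]
      exact ih _ (fun q hq => h q (List.mem_cons_of_mem _ hq))

-- A's whole nested loop: slot k ends at its start value plus the count of valid roles in subs
theorem pv_outer_getD (k : String) (subs : List String) (L : List (String × List String))
    (hnd : (L.map Prod.fst).Nodup) (hmem : (k, subs) ∈ L) (roles : List String) :
    ∀ d : PySem.Dict String Int,
    (roles.foldl (fun d role =>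
        if pvValidRole role then
          L.foldl (fun d cs => if cs.2.contains role then d.modify cs.1 0 (· + 1) else d) d
        else d) d).getD k 0
      = d.getD k 0 + (roles.countP (fun r => pvValidRole r && subs.contains r) : Int) := by
  induction roles with
  | nil => intro d; simp
  | cons r roles ih =>
    intro d
    simp only [List.foldl_cons, List.countP_cons]
    by_cases hv : pvValidRole r = true
    · rw [if_pos hv, ih, pv_inner_getD, pv_countP_nodup k r subs L hnd hmem]
      by_cases hc : subs.contains r = true
      · simp only [hc, if_pos, hv, Bool.true_and]
        push_cast
        ring
      · simp only [hc, hv, Bool.true_and, if_false, Bool.false_eq_true]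
        push_cast
        ring
    · rw [if_neg hv, ih]
      simp [hv]

-- A's whole nested loop preserves the key list when it already contains every item key
theorem pv_outer_keys (L : List (String × List String)) (roles : List String) :
    ∀ d : PySem.Dict String Int, (∀ p ∈ L, p.1 ∈ d.keys) →
    (roles.foldl (fun d role =>
        if pvValidRole role then
          L.foldl (fun d cs => if cs.2.contains role then d.modify cs.1 0 (· + 1) else d) d
        else d) d).keys = d.keys := by
  induction roles with
  | nil => intro d _; rfl
  | cons r roles ih =>
    intro d h
    simp only [List.foldl_cons]
    by_cases hv : pvValidRole r = true
    · have hk := pv_inner_keys r L d h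
      rw [if_pos hv, ih _ (fun q hq => by rw [hk]; exact h q hq)]
      exact hk
    · rw [if_neg hv]
      exact ih _ h


-- the two breakdown messages coincide
theorem pv_breakdown (updated_roles : List String) (role_data : List (String × List String)) :
    PySem.Str.join "\n"
      ((updated_roles.foldl (fun d role =>
          if pvValidRole role then
            (PySem.Dict.ofList role_data).items.foldl
              (fun d cs => if cs.2.contains role then d.modify cs.1 0 (· + 1) else d) d
          else d)
        ((PySem.Dict.ofList role_data).keys.foldl (fun d c => d.insert c 0) PySem.Dict.empty)).items.map
          (fun p => "**" ++ p.1 ++ " roles:** " ++ PySem.Int.toStr p.2))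
    = PySem.Str.join "\n"
      ((PySem.Dict.ofList role_data).items.map (fun cs =>
        "**" ++ cs.1 ++ " roles:** " ++ PySem.Int.toStr
          (((PySem.List.dedup cs.2).map (fun s =>
            ((updated_roles.filter pvValidRole).foldl (fun d r => d.insert r (d.getD r 0 + 1))
              PySem.Dict.empty).getD s 0)).sum))) := by
  set rd : PySem.Dict String (List String) := PySem.Dict.ofList role_data with hrd
  have hnd : rd.keys.Nodup := PySem.Dict.nodup_keys_ofList role_data
  have hndf : (rd.items.map Prod.fst).Nodup := hnd
  set d0 : PySem.Dict String Int := rd.keys.foldl (fun d c => d.insert c 0) PySem.Dict.empty with hd0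
  set final : PySem.Dict String Int :=
    updated_roles.foldl (fun d role =>
      if pvValidRole role then
        rd.items.foldl (fun d cs => if cs.2.contains role then d.modify cs.1 0 (· + 1) else d) d
      else d) d0 with hfinal
  have hkeys0 : d0.keys = rd.keys := by
    have := PySem.Dict.keys_foldl_insert rd.keys (fun _ _ => (0:Int)) PySem.Dict.empty
    simpa [PySem.Dict.keys_empty, PySem.Set.update_nil_left,
      PySem.Set.ofList_eq_self_of_nodup rd.keys hnd, hd0] using this
  have hkeys : final.keys = rd.keys := by
    rw [hfinal, pv_outer_keys rd.items updated_roles d0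
      (fun p hp => hkeys0 ▸ List.mem_map_of_mem hp), hkeys0]
  have hitems : final.items = rd.items.map (fun p => (p.1, final.getD p.1 0)) := by
    rw [PySem.Dict.items_eq_map_keys final (hkeys ▸ hnd) 0, hkeys]
    show (rd.items.map Prod.fst).map _ = _
    rw [List.map_map]
    exact List.map_congr_left (fun p _ => rfl)
  have hvalue : ∀ p ∈ rd.items,
      final.getD p.1 0
        = ((PySem.List.dedup p.2).map (fun s =>
            ((updated_roles.filter pvValidRole).foldl (fun d r => d.insert r (d.getD r 0 + 1))
              PySem.Dict.empty).getD s 0)).sum := by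
    intro p hp
    have hpm : (p.1, p.2) ∈ rd.items := by simpa using hp
    rw [hfinal, pv_outer_getD p.1 p.2 rd.items hndf hpm updated_roles d0,
      pv_init_getD rd.keys PySem.Dict.empty p.1 (PySem.Dict.getD_empty p.1 0), zero_add]
    have hfreq : ∀ s : String,
        ((updated_roles.filter pvValidRole).foldl (fun d r => d.insert r (d.getD r 0 + 1))
          PySem.Dict.empty).getD s 0 = ((updated_roles.filter pvValidRole).count s : Int) := by
      intro s
      rw [PySem.Dict.getD_foldl_insert_add_one, PySem.Dict.getD_empty, zero_add]
    rw [List.map_congr_left (fun s _ => hfreq s), pv_dedup_count, List.countP_filter]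
    congr 1
    exact List.countP_congr (fun r _ => by rw [Bool.and_comm])
  rw [hitems, List.map_map]
  exact congrArg (PySem.Str.join "\n")
    (List.map_congr_left (fun p hp => by
      simp only [Function.comp]
      rw [hvalue p hp]))

-- ===== VERDICT (by name: the statement is the Claim_ definition above) =====
theorem generate_role_message_spec : Claim_equal_generate_role_message := by
  intro updated_roles role_data max_roles _
  simp only [Spec_generate_role_message, generate_role_message, generate_role_message_alt]
  congr 1
  exact pv_breakdown updated_roles role_data
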